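-- pv_equiv track=rewrite | github.com/safaabouhnine/CourseGuideAI | src/sparql_optimizer.py | reorder_filters
-- ===== SOURCE A (Python) =====
-- def reorder_filters(query: str) -> str:
--     """
--     Réorganise les FILTER pour optimiser l'exécution
--     Les filtres les plus sélectifs doivent venir en premier
--
--     Args:
--         query: Requête SPARQL
--
--     Returns:
--         Requête optimisée
--     """
--     # Simple optimisation : déplacer les FILTER CONTAINS vers la fin
--     # car ils sont généralement plus coûteux
--
--     lines = query.split('\n')
--     filter_lines = [l for l in lines if 'FILTER' in l.upper()]
--     other_lines = [l for l in lines if 'FILTER' not in l.upper()]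
--
--     # Réorganiser : filtres simples d'abord, CONTAINS à la fin
--     simple_filters = [f for f in filter_lines if 'CONTAINS' not in f.upper()]
--     complex_filters = [f for f in filter_lines if 'CONTAINS' in f.upper()]
--
--     optimized_lines = other_lines[:-1] + simple_filters + complex_filters + [other_lines[-1]]
--
--     return '\n'.join(optimized_lines)
-- ===== SOURCE B (Python) =====
-- def reorder_filters(query: str) -> str:
--     """Stable-sort formulation: rank each (index, line) pair into priority
--     classes 0 (non-filter), 1 (plain FILTER), 2 (FILTER with CONTAINS),
--     3 (the last non-filter line); Python's stable sort keeps the original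
--     order inside each class, yielding A's layout."""
--     lines = query.split('\n')
--     last = [i for i, l in enumerate(lines) if 'FILTER' not in l.upper()][-1]
--
--     def rank(pair):
--         i, l = pair
--         if i == last:
--             return 3
--         u = l.upper()
--         if 'FILTER' in u:
--             return 2 if 'CONTAINS' in u else 1
--         return 0
--
--     return '\n'.join(l for _, l in sorted(enumerate(lines), key=rank))
-- ===== Notes on version B (the rewrite author's own statement) =====
-- stated objective: alternative
-- what changed: A partitions the lines into three groups with four filtering passes and concatenates them; B instead performs one stable sort of the enumerated (index, line) pairs under a 4-valued priority rank (non-filter 0, plain FILTER 1, FILTER+CONTAINS 2, last non-filter line 3), letting sort stability reproduce A's layout.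
-- outside the precondition, e.g. on reorder_filters('FILTER'): A raises IndexError, B raises IndexError
import Mathlib
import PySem

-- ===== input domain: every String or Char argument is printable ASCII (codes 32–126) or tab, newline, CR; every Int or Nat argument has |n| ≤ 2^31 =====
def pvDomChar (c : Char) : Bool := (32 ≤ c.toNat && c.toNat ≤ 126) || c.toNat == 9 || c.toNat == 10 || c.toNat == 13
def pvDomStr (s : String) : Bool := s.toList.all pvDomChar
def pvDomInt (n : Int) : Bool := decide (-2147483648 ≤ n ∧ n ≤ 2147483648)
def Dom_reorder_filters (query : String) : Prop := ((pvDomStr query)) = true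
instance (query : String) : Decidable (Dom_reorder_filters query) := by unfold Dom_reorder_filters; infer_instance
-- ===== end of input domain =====

-- B re-derives A's layout as ONE stable sort of (index, line) pairs under a priority rank
-- instead of A's four filtering passes; same return value wherever A returns.

-- ===== PORT A =====
def reorder_filters (query : String) : String :=
  -- split? is always some here (sep "\n" ≠ "")
  let lines := ((PySem.Str.split? query "\n").getD [])
  let filter_lines := lines.filter (fun l => PySem.Str.isIn "FILTER" (PySem.Str.upper l))
  let other_lines := lines.filter (fun l => !(PySem.Str.isIn "FILTER" (PySem.Str.upper l)))
  let simple_filters := filter_lines.filter (fun f => !(PySem.Str.isIn "CONTAINS" (PySem.Str.upper f)))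
  let complex_filters := filter_lines.filter (fun f => PySem.Str.isIn "CONTAINS" (PySem.Str.upper f))
  -- other_lines[-1] raises IndexError when other_lines = []; excluded by Pre_
  let optimized_lines := PySem.List.slice other_lines none (some (-1)) ++ simple_filters ++ complex_filters ++ [PySem.List.pyGetD other_lines (-1) ""]
  PySem.Str.join "\n" optimized_lines

-- ===== PORT B =====
-- rank(pair) of Source B
def pvRank (last : Int) (p : Int × String) : Int :=
  if p.1 == last then 3
  else
    let u := PySem.Str.upper p.2
    if PySem.Str.isIn "FILTER" u then (if PySem.Str.isIn "CONTAINS" u then 2 else 1)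
    else 0

def reorder_filters_alt (query : String) : String :=
  let lines := ((PySem.Str.split? query "\n").getD [])
  -- [i for i, l in enumerate(lines) if 'FILTER' not in l.upper()][-1]
  -- ([][-1] raises IndexError when every line is a filter; excluded by Pre_)
  let last := PySem.List.pyGetD
      (((PySem.List.enumerate lines).filter
          (fun p => !(PySem.Str.isIn "FILTER" (PySem.Str.upper p.2)))).map (·.1)) (-1) 0
  PySem.Str.join "\n"
    ((PySem.List.sorted (PySem.List.enumerate lines) (pvRank last)).map (·.2))

-- ===== PRECONDITION & SPEC =====
-- Pre_ excludes exactly the queries whose every line contains "FILTER" (case-insensitively):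
-- there A's other_lines[-1] (and B's [...][-1]) raise IndexError.
def Pre_reorder_filters (query : String) : Prop :=
  ((((PySem.Str.split? query "\n").getD [])).any (fun l => !(PySem.Str.isIn "FILTER" (PySem.Str.upper l)))) = true
instance (query : String) : Decidable (Pre_reorder_filters query) := by unfold Pre_reorder_filters; infer_instance
def pvWitness_reorder_filters : String := "SELECT ?s WHERE {\n?s ?p ?o .\nFILTER(?s > 1)\nFILTER(CONTAINS(?o, \"x\"))\n}"

def Spec_reorder_filters (query : String) (out : String) : Prop := out = reorder_filters_alt query
instance (query : String) (out : String) : Decidable (Spec_reorder_filters query out) := by unfold Spec_reorder_filters; infer_instance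

-- ===== CLAIM =====
def Claim_equal_reorder_filters : Prop := ∀ (query : String), Dom_reorder_filters query → Pre_reorder_filters query → Spec_reorder_filters query (reorder_filters query)

-- ===== LEMMAS AND PROOFS =====

-- inserting an element every list member should precede puts it in front
theorem pvInsertBy_all_before {α : Type} (before : α → α → Bool) (x : α) (ys : List α)
    (h : ∀ y ∈ ys, before x y = true) :
    PySem.List.insertBy before x ys = x :: ys := by
  cases ys with
  | nil => rfl
  | cons y ys => simp [PySem.List.insertBy, h y (by simp)]

-- insertBy skips a prefix none of whose members x should precede
theorem pvInsertBy_append_left {α : Type} (before : α → α → Bool) (x : α) (as bs : List α)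
    (h : ∀ y ∈ as, before x y = false) :
    PySem.List.insertBy before x (as ++ bs) = as ++ PySem.List.insertBy before x bs := by
  induction as with
  | nil => rfl
  | cons a as ih =>
    simp only [List.cons_append, PySem.List.insertBy, h a (by simp)]
    simp only [Bool.false_eq_true, if_false]
    rw [ih (fun y hy => h y (by simp [hy]))]

-- the stable insertion sort with a {0,1,2,3}-valued key fills four ordered buckets
theorem pvFoldl_insertBy_buckets {α : Type} (key : α → Int) (xs g0 g1 g2 g3 : List α)
    (h0 : ∀ y ∈ g0, key y = 0) (h1 : ∀ y ∈ g1, key y = 1)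
    (h2 : ∀ y ∈ g2, key y = 2) (h3 : ∀ y ∈ g3, key y = 3)
    (hx : ∀ x ∈ xs, key x = 0 ∨ key x = 1 ∨ key x = 2 ∨ key x = 3) :
    xs.foldl (fun acc x => PySem.List.insertBy (fun a b => decide (key a < key b)) x acc)
        (g0 ++ (g1 ++ (g2 ++ g3)))
    = (g0 ++ xs.filter (fun x => key x == 0)) ++
      ((g1 ++ xs.filter (fun x => key x == 1)) ++
       ((g2 ++ xs.filter (fun x => key x == 2)) ++
        (g3 ++ xs.filter (fun x => key x == 3)))) := by
  induction xs generalizing g0 g1 g2 g3 with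
  | nil => simp
  | cons x xs ih =>
    simp only [List.foldl_cons]
    rcases hx x (by simp) with hk | hk | hk | hk
    · rw [pvInsertBy_append_left _ _ g0 _ (by intro y hy; simp [h0 y hy, hk]),
          pvInsertBy_all_before _ _ _ (by
            intro y hy; rcases List.mem_append.mp hy with hy | hy
            · simp [h1 y hy, hk]
            · rcases List.mem_append.mp hy with hy | hy
              · simp [h2 y hy, hk]
              · simp [h3 y hy, hk])]
      have H := ih (g0 := g0 ++ [x]) (g1 := g1) (g2 := g2) (g3 := g3)
        (by intro y hy; rcases List.mem_append.mp hy with hy | hy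
            · exact h0 y hy
            · simp at hy; simpa [hy] using hk) h1 h2 h3
        (fun z hz => hx z (by simp [hz]))
      simp only [List.append_assoc, List.cons_append, List.nil_append] at H
      rw [H]
      simp [hk]
    · rw [pvInsertBy_append_left _ _ g0 _ (by intro y hy; simp [h0 y hy, hk]),
          pvInsertBy_append_left _ _ g1 _ (by intro y hy; simp [h1 y hy, hk]),
          pvInsertBy_all_before _ _ _ (by
            intro y hy; rcases List.mem_append.mp hy with hy | hy
            · simp [h2 y hy, hk]
            · simp [h3 y hy, hk])]
      have H := ih (g0 := g0) (g1 := g1 ++ [x]) (g2 := g2) (g3 := g3) h0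
        (by intro y hy; rcases List.mem_append.mp hy with hy | hy
            · exact h1 y hy
            · simp at hy; simpa [hy] using hk) h2 h3
        (fun z hz => hx z (by simp [hz]))
      simp only [List.append_assoc, List.cons_append, List.nil_append] at H
      rw [H]
      simp [hk]
    · rw [pvInsertBy_append_left _ _ g0 _ (by intro y hy; simp [h0 y hy, hk]),
          pvInsertBy_append_left _ _ g1 _ (by intro y hy; simp [h1 y hy, hk]),
          pvInsertBy_append_left _ _ g2 _ (by intro y hy; simp [h2 y hy, hk]),
          pvInsertBy_all_before _ _ _ (by intro y hy; simp [h3 y hy, hk])]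
      have H := ih (g0 := g0) (g1 := g1) (g2 := g2 ++ [x]) (g3 := g3) h0 h1
        (by intro y hy; rcases List.mem_append.mp hy with hy | hy
            · exact h2 y hy
            · simp at hy; simpa [hy] using hk) h3
        (fun z hz => hx z (by simp [hz]))
      simp only [List.append_assoc, List.cons_append, List.nil_append] at H
      rw [H]
      simp [hk]
    · rw [pvInsertBy_append_left _ _ g0 _ (by intro y hy; simp [h0 y hy, hk]),
          pvInsertBy_append_left _ _ g1 _ (by intro y hy; simp [h1 y hy, hk]),
          pvInsertBy_append_left _ _ g2 _ (by intro y hy; simp [h2 y hy, hk]),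
          PySem.List.insertBy_of_forall_not_before _ _ _ (by intro y hy; simp [h3 y hy, hk])]
      have H := ih (g0 := g0) (g1 := g1) (g2 := g2) (g3 := g3 ++ [x]) h0 h1 h2
        (by intro y hy; rcases List.mem_append.mp hy with hy | hy
            · exact h3 y hy
            · simp at hy; simpa [hy] using hk)
        (fun z hz => hx z (by simp [hz]))
      simp only [List.append_assoc, List.cons_append, List.nil_append] at H
      rw [H]
      simp [hk]

-- in a list with strictly increasing first components an element is determined by its first component
theorem pvFst_inj {α : Type} (l : List (Int × α)) (hp : l.Pairwise (fun p q => p.1 < q.1))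
    (x z : Int × α) (hx : x ∈ l) (hz : z ∈ l) (h : x.1 = z.1) : x = z := by
  induction l with
  | nil => cases hx
  | cons a l ih =>
    rcases List.pairwise_cons.mp hp with ⟨ha, hl⟩
    rcases List.mem_cons.mp hx with h1 | h1 <;> rcases List.mem_cons.mp hz with h2 | h2
    · rw [h1, h2]
    · subst h1; have := ha z h2; omega
    · subst h2; have := ha x h1; omega
    · exact ih hl h1 h2

theorem pvLt_getLast {α : Type} (l : List (Int × α)) (hp : l.Pairwise (fun p q => p.1 < q.1))
    (hne : l ≠ []) : ∀ p ∈ l.dropLast, p.1 < (l.getLast hne).1 := by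
  intro p hpm
  have hd : l.dropLast ++ [l.getLast hne] = l := List.dropLast_append_getLast hne
  have hp' : (l.dropLast ++ [l.getLast hne]).Pairwise (fun p q => p.1 < q.1) := by rw [hd]; exact hp
  exact (List.pairwise_append.mp hp').2.2 p hpm _ (by simp)

-- filtering away the last fst of a strictly-fst-increasing list drops exactly its last element
theorem pvFilter_ne_getLast {α : Type} (l : List (Int × α)) (hp : l.Pairwise (fun p q => p.1 < q.1))
    (hne : l ≠ []) :
    l.filter (fun p => !(p.1 == (l.getLast hne).1)) = l.dropLast := by
  have hlt := pvLt_getLast l hp hne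
  set z := l.getLast hne with hzdef
  have hd : l.dropLast ++ [z] = l := List.dropLast_append_getLast hne
  calc l.filter (fun p => !(p.1 == z.1))
      = (l.dropLast ++ [z]).filter (fun p => !(p.1 == z.1)) := by rw [hd]
    _ = l.dropLast := by
        rw [List.filter_append, List.filter_eq_self.mpr
              (fun p hpm => by have := hlt p hpm; simp; omega)]
        simp

-- in a strictly-fst-increasing list only z itself carries z's fst
theorem pvFilter_eq_mem {α : Type} (l : List (Int × α)) (hp : l.Pairwise (fun p q => p.1 < q.1))
    (z : Int × α) (hz : z ∈ l) : l.filter (fun p => p.1 == z.1) = [z] := by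
  induction l with
  | nil => cases hz
  | cons a l ih =>
    rcases List.pairwise_cons.mp hp with ⟨ha, hl⟩
    rcases List.mem_cons.mp hz with h1 | h1
    · subst h1
      rw [List.filter_cons_of_pos (by simp),
          List.filter_eq_nil_iff.mpr (fun p hpm => by have := ha p hpm; simp; omega)]
    · rw [List.filter_cons_of_neg (by have := ha z h1; simp; omega)]
      exact ih hl h1

-- the body of both ports after splitting, for arbitrary line tests F ('FILTER' in upper) and C ('CONTAINS' in upper)
theorem pvMainGen (F C : String → Bool) (lines : List String)
    (hpre : lines.any (fun l => !(F l)) = true) :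
    PySem.Str.join "\n"
      (PySem.List.slice (lines.filter (fun l => !(F l))) none (some (-1)) ++
       (lines.filter (fun l => F l)).filter (fun f => !(C f)) ++
       (lines.filter (fun l => F l)).filter (fun f => C f) ++
       [PySem.List.pyGetD (lines.filter (fun l => !(F l))) (-1) ""]) =
    PySem.Str.join "\n"
      ((PySem.List.sorted (PySem.List.enumerate lines)
          (fun p => if p.1 == PySem.List.pyGetD
              (((PySem.List.enumerate lines).filter (fun p => !(F p.2))).map (·.1)) (-1) 0
            then (3:Int) else if F p.2 then (if C p.2 then 2 else 1) else 0)).map (·.2)) := by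
  refine congrArg (PySem.Str.join "\n") ?_
  set e := PySem.List.enumerate lines with he
  have hpl : e.Pairwise (fun p q => p.1 < q.1) := PySem.List.pairwise_lt_enumerate lines 0
  have hsnd : e.map (fun x => x.2) = lines := PySem.List.map_snd_enumerate lines 0
  set nf := e.filter (fun p => !(F p.2)) with hnf
  have hnfne : nf ≠ [] := by
    rcases List.any_eq_true.mp hpre with ⟨l, hl, hFl⟩
    rw [← hsnd] at hl
    rcases List.mem_map.mp hl with ⟨p, hpmem, hpeq⟩
    exact List.ne_nil_of_mem (List.mem_filter.mpr ⟨hpmem, by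
      rw [show p.2 = l from hpeq]; exact hFl⟩)
  set z := nf.getLast hnfne with hzdef
  have hzmem_nf : z ∈ nf := List.getLast_mem hnfne
  have hzmem : z ∈ e := (List.mem_filter.mp hzmem_nf).1
  have hzF : F z.2 = false := by simpa using (List.mem_filter.mp hzmem_nf).2
  have hnfp : nf.Pairwise (fun p q => p.1 < q.1) := List.Pairwise.filter _ hpl
  have hmapne : nf.map (·.1) ≠ [] := by simpa using hnfne
  have hlast : PySem.List.pyGetD (nf.map (·.1)) (-1) 0 = z.1 := by
    rw [PySem.List.pyGetD_neg_one _ _ hmapne, List.getLast_map]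
  rw [hlast, PySem.List.sorted_eq_foldl_insertBy]
  have hb := pvFoldl_insertBy_buckets
      (key := fun p : Int × String => if p.1 == z.1 then (3:Int)
        else if F p.2 then (if C p.2 then 2 else 1) else 0)
      e [] [] [] [] (by simp) (by simp) (by simp) (by simp)
      (by intro x hx; dsimp only; split_ifs <;> simp)
  simp only [List.nil_append, List.append_nil] at hb
  rw [hb]
  have hne_fst : ∀ p ∈ e, F p.2 = true → (p.1 == z.1) = false := by
    intro p hpm hFp
    by_contra hcon
    have hpz : p.1 = z.1 := by
      cases hb : (p.1 == z.1) with
      | false => exact absurd hb hcon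
      | true => exact beq_iff_eq.mp hb
    rw [pvFst_inj e hpl p z hpm hzmem hpz] at hFp
    rw [hzF] at hFp; cases hFp
  have h0 : e.filter (fun x => (if x.1 == z.1 then (3:Int)
      else if F x.2 then (if C x.2 then 2 else 1) else 0) == 0)
      = nf.dropLast := by
    rw [List.filter_congr (q := fun p : Int × String => (!(p.1 == z.1)) && !(F p.2))
          (by intro p hpm
              by_cases hq : (p.1 == z.1) = true <;> by_cases hf : F p.2 = true
              · simp [hq, hf]
              · simp [hq, hf]
              · simp only [hq, hf, if_true]
                split_ifs <;> simp_all
              · simp [hq, hf])]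
    rw [← List.filter_filter, ← hnf]
    simpa [← hzdef] using pvFilter_ne_getLast nf hnfp hnfne
  have h1 : e.filter (fun x => (if x.1 == z.1 then (3:Int)
      else if F x.2 then (if C x.2 then 2 else 1) else 0) == 1)
      = e.filter (fun p => F p.2 && !(C p.2)) := by
    refine List.filter_congr ?_
    intro p hpm
    by_cases hf : F p.2 = true
    · rw [hne_fst p hpm hf]
      by_cases hc : C p.2 = true <;> simp [hf, hc]
    · by_cases hq : (p.1 == z.1) = true <;> simp [hq, hf]
  have h2 : e.filter (fun x => (if x.1 == z.1 then (3:Int)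
      else if F x.2 then (if C x.2 then 2 else 1) else 0) == 2)
      = e.filter (fun p => F p.2 && C p.2) := by
    refine List.filter_congr ?_
    intro p hpm
    by_cases hf : F p.2 = true
    · rw [hne_fst p hpm hf]
      by_cases hc : C p.2 = true <;> simp [hf, hc]
    · by_cases hq : (p.1 == z.1) = true <;> simp [hq, hf]
  have h3 : e.filter (fun x => (if x.1 == z.1 then (3:Int)
      else if F x.2 then (if C x.2 then 2 else 1) else 0) == 3)
      = [z] := by
    rw [List.filter_congr (q := fun p : Int × String => p.1 == z.1)
          (by intro p hpm
              by_cases hq : (p.1 == z.1) = true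
              · simp [hq]
              · simp only [hq]
                split_ifs <;> simp_all)]
    exact pvFilter_eq_mem e hpl z hzmem
  rw [List.map_append, List.map_append, List.map_append, h0, h1, h2, h3]
  have hother : lines.filter (fun l => !(F l)) = nf.map (fun p => p.2) := by
    rw [← hsnd, hnf]; simp [List.filter_map, Function.comp_def]
  have hfilt : ∀ (P : String → Bool),
      lines.filter P = (e.filter (fun p => P p.2)).map (fun p => p.2) := by
    intro P; rw [← hsnd]; simp [List.filter_map, Function.comp_def]
  have hsimple : (lines.filter (fun l => F l)).filter (fun f => !(C f))
      = (e.filter (fun p => F p.2 && !(C p.2))).map (fun p => p.2) := by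
    rw [hfilt (fun l => F l)]
    simp only [List.filter_map, Function.comp_def, List.filter_filter]
    exact congrArg _ (List.filter_congr (fun p _ => Bool.and_comm _ _))
  have hcomplex : (lines.filter (fun l => F l)).filter (fun f => C f)
      = (e.filter (fun p => F p.2 && C p.2)).map (fun p => p.2) := by
    rw [hfilt (fun l => F l)]
    simp only [List.filter_map, Function.comp_def, List.filter_filter]
    exact congrArg _ (List.filter_congr (fun p _ => Bool.and_comm _ _))
  have hlastline : PySem.List.pyGetD (lines.filter (fun l => !(F l))) (-1) "" = z.2 := by
    rw [hother, PySem.List.pyGetD_neg_one _ _ (by simpa using hnfne), List.getLast_map]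
  rw [PySem.List.slice_to_neg_one, hlastline, hother, hsimple, hcomplex, List.map_dropLast]
  simp [List.append_assoc]

-- ===== VERDICT =====
theorem reorder_filters_spec : Claim_equal_reorder_filters := by
  intro query _ hpre
  unfold Spec_reorder_filters reorder_filters reorder_filters_alt
  unfold Pre_reorder_filters at hpre
  have h := pvMainGen (fun l => PySem.Str.isIn "FILTER" (PySem.Str.upper l))
      (fun l => PySem.Str.isIn "CONTAINS" (PySem.Str.upper l))
      ((PySem.Str.split? query "\n").getD []) hpre
  exact h
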